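-- pv_equiv track=rewrite | github.com/evanvnguyen/mesh-noc-router | cpu/python/generate_vsra_test_cases.py | build_64bit_result_vsra
-- ===== SOURCE A (Python) =====
-- def sra(value, shift, width):
--     mask = (1 << width) - 1
--     value = value & mask
--     sign_bit = 1 << (width - 1)
--     if value & sign_bit:
--         value = value - (1 << width)
--     result = value >> shift
--     return result & mask
--
-- def build_64bit_result_vsra(WW, a_chunks, b_chunks):
--     if WW == '00':
--         # 8-bit fields: process 8 fields, field 0 is MSB, field 7 is LSB.
--         result_val = 0
--         result_chunks = []
--         for i in range(8):
--             res = sra(a_chunks[i], b_chunks[i], 8)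
--             result_chunks.append(res)
--             result_val |= (res << (56 - i * 8))
--         return result_val, result_chunks
--
--     elif WW == '01':
--         # 16-bit fields: process 4 fields.
--         result_val = 0
--         result_chunks = []
--         for i in range(4):
--             res = sra(a_chunks[i], b_chunks[i], 16)
--             result_chunks.append(res)
--             result_val |= (res << (48 - i * 16))
--         return result_val, result_chunks
--
--     elif WW == '10':
--         # 32-bit fields: process 2 fields.
--         res0 = sra(a_chunks[0], b_chunks[0], 32)
--         res1 = sra(a_chunks[1], b_chunks[1], 32)
--         result_val = (res0 << 32) | res1
--         return result_val, [res0, res1]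
--
--     elif WW == '11':
--         # 64-bit field: assume a_chunks is a one-element list.
--         a_val = a_chunks[0] if len(a_chunks) == 1 else 0
--         b_val = b_chunks[0] if len(b_chunks) == 1 else 0
--         result_val = sra(a_val, b_val, 64)
--         return result_val, [result_val]
--     else:
--         return 0, []
-- ===== SOURCE B (Python) =====
-- def _lane(a, b, width):
--     # binary string of the field, MSB first
--     bits = format(a & ((1 << width) - 1), '0{}b'.format(width))
--     # arithmetic right shift as sign-character replication + truncation
--     return (bits[0] * min(b, width) + bits)[:width]
--
-- def _pack(width, count, a_chunks, b_chunks):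
--     lanes = [_lane(a_chunks[i], b_chunks[i], width) for i in range(count)]
--     return int(''.join(lanes), 2), [int(l, 2) for l in lanes]
--
-- def build_64bit_result_vsra(WW, a_chunks, b_chunks):
--     if WW == '00':
--         return _pack(8, 8, a_chunks, b_chunks)
--     if WW == '01':
--         return _pack(16, 4, a_chunks, b_chunks)
--     if WW == '10':
--         return _pack(32, 2, a_chunks, b_chunks)
--     if WW == '11':
--         a_val = a_chunks[0] if len(a_chunks) == 1 else 0
--         b_val = b_chunks[0] if len(b_chunks) == 1 else 0
--         rv = int(_lane(a_val, b_val, 64), 2)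
--         return rv, [rv]
--     return 0, []
-- ===== Notes on version B (the rewrite author's own statement) =====
-- stated objective: alternative
-- what changed: B works on binary-string representations instead of integer arithmetic: each field is rendered as a fixed-width bit string, the arithmetic right shift is performed textually by replicating the sign character and truncating to the field width, and the packed 64-bit value is obtained by concatenating the lane strings and parsing the concatenation in base 2, replacing A's mask/sign-subtract/shift helper and its per-index shift-and-OR packing.
import Mathlib
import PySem

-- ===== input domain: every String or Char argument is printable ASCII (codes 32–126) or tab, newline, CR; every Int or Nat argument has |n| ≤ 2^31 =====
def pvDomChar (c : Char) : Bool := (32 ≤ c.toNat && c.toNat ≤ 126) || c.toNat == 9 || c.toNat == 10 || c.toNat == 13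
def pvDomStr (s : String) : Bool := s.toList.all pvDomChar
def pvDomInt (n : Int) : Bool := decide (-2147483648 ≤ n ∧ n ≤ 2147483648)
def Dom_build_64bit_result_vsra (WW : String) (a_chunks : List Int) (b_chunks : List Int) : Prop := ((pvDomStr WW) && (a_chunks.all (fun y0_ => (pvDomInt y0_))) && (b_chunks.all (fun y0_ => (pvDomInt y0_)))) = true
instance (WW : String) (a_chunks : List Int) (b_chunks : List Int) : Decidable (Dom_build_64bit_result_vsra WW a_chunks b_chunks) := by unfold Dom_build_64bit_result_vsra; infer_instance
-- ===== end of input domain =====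

-- B replaces A's integer arithmetic by binary-STRING manipulation: each field is rendered as a
-- fixed-width bit string, the arithmetic shift is done textually (replicate the sign character,
-- truncate to the width) and the packed value is the base-2 parse of the concatenated lane
-- strings; objective: alternative. Proved: A = B on every input satisfying Pre_ (the inputs
-- where the Python A returns normally).

-- ===== PORT A =====
-- helper sra(value, shift, width): literal transliteration of A's helper
def pySra (value shift : Int) (width : Nat) : Int :=
  let mask : Int := ((1:Int) <<< width) - 1
  let v := PySem.Int.band value mask
  let signBit : Int := (1:Int) <<< (width - 1)
  let v2 := if PySem.Int.band v signBit ≠ 0 then v - ((1:Int) <<< width) else v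
  let result := v2 >>> shift.toNat
  PySem.Int.band result mask

def build_64bit_result_vsra (WW : String) (a_chunks : List Int) (b_chunks : List Int) : Int × List Int :=
  if WW = "00" then
    let st := (PySem.List.pyRange 0 8 1).foldl (fun (st : Int × List Int) i =>
      let res := pySra (PySem.List.pyGetD a_chunks i 0) (PySem.List.pyGetD b_chunks i 0) 8
      (PySem.Int.bor st.1 (res <<< (56 - i * 8).toNat), st.2 ++ [res])) (0, [])
    (st.1, st.2)
  else if WW = "01" then
    let st := (PySem.List.pyRange 0 4 1).foldl (fun (st : Int × List Int) i =>
      let res := pySra (PySem.List.pyGetD a_chunks i 0) (PySem.List.pyGetD b_chunks i 0) 16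
      (PySem.Int.bor st.1 (res <<< (48 - i * 16).toNat), st.2 ++ [res])) (0, [])
    (st.1, st.2)
  else if WW = "10" then
    let res0 := pySra (PySem.List.pyGetD a_chunks 0 0) (PySem.List.pyGetD b_chunks 0 0) 32
    let res1 := pySra (PySem.List.pyGetD a_chunks 1 0) (PySem.List.pyGetD b_chunks 1 0) 32
    (PySem.Int.bor (res0 <<< (32:Nat)) res1, [res0, res1])
  else if WW = "11" then
    let aVal := if a_chunks.length = 1 then PySem.List.pyGetD a_chunks 0 0 else 0
    let bVal := if b_chunks.length = 1 then PySem.List.pyGetD b_chunks 0 0 else 0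
    let rv := pySra aVal bVal 64
    (rv, [rv])
  else (0, [])

-- ===== PORT B =====
-- port of format(n, '0{width}b') for n < 2^width: the width binary digits, MSB first
def padBin (n : Nat) (width : Nat) : List Char :=
  (List.range width).map (fun i => if n.testBit (width - 1 - i) then '1' else '0')

-- port of Source B's _lane: bit string of a & mask, sign char replicated min(b,width) times, truncated.
-- (Python's '1'*min(b,width) is '' for negative b; min b.toNat width is 0 there, the same list.)
def laneB (a b : Int) (width : Nat) : List Char :=
  let bits := padBin (PySem.Int.band a (((1:Int) <<< width) - 1)).toNat width
  (List.replicate (min b.toNat width) (bits.headD '0') ++ bits).take width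

-- port of int(s, 2) on a '0'/'1' string
def bitsToInt (bits : List Char) : Int :=
  bits.foldl (fun acc c => 2 * acc + (if c = '1' then 1 else 0)) 0

-- port of Source B's _pack
def packB (width count : Nat) (a_chunks b_chunks : List Int) : Int × List Int :=
  let lanes := (PySem.List.pyRange 0 count 1).map
    (fun i => laneB (PySem.List.pyGetD a_chunks i 0) (PySem.List.pyGetD b_chunks i 0) width)
  (bitsToInt lanes.flatten, lanes.map bitsToInt)

def build_64bit_result_vsra_alt (WW : String) (a_chunks : List Int) (b_chunks : List Int) : Int × List Int :=
  if WW = "00" then packB 8 8 a_chunks b_chunks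
  else if WW = "01" then packB 16 4 a_chunks b_chunks
  else if WW = "10" then packB 32 2 a_chunks b_chunks
  else if WW = "11" then
    let aVal := if a_chunks.length = 1 then PySem.List.pyGetD a_chunks 0 0 else 0
    let bVal := if b_chunks.length = 1 then PySem.List.pyGetD b_chunks 0 0 else 0
    let rv := bitsToInt (laneB aVal bVal 64)
    (rv, [rv])
  else (0, [])

-- ===== PRECONDITION & SPEC =====
-- Pre_ excludes exactly the inputs where the Python A raises: an IndexError when the chunk
-- lists are shorter than the field count the WW code demands, and a ValueError from a
-- negative shift amount (value >> negative raises in Python).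
def Pre_build_64bit_result_vsra (WW : String) (a_chunks : List Int) (b_chunks : List Int) : Prop :=
  (WW = "00" → 8 ≤ a_chunks.length ∧ 8 ≤ b_chunks.length ∧ ∀ x ∈ b_chunks.take 8, 0 ≤ x) ∧
  (WW = "01" → 4 ≤ a_chunks.length ∧ 4 ≤ b_chunks.length ∧ ∀ x ∈ b_chunks.take 4, 0 ≤ x) ∧
  (WW = "10" → 2 ≤ a_chunks.length ∧ 2 ≤ b_chunks.length ∧ ∀ x ∈ b_chunks.take 2, 0 ≤ x) ∧
  (WW = "11" → b_chunks.length = 1 → 0 ≤ b_chunks.headD 0)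
instance (WW : String) (a_chunks : List Int) (b_chunks : List Int) : Decidable (Pre_build_64bit_result_vsra WW a_chunks b_chunks) := by unfold Pre_build_64bit_result_vsra; infer_instance

def pvWitness_build_64bit_result_vsra : String × List Int × List Int :=
  ("00", [1, -2, 3, -4, 5, -6, 7, -8], [0, 1, 2, 3, 4, 5, 6, 7])

def Spec_build_64bit_result_vsra (WW : String) (a_chunks : List Int) (b_chunks : List Int) (out : Int × List Int) : Prop := out = build_64bit_result_vsra_alt WW a_chunks b_chunks
instance (WW : String) (a_chunks : List Int) (b_chunks : List Int) (out : Int × List Int) : Decidable (Spec_build_64bit_result_vsra WW a_chunks b_chunks out) := by unfold Spec_build_64bit_result_vsra; infer_instance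

-- ===== CLAIM (what is proved, stated in full; the proofs are below) =====
def Claim_equal_build_64bit_result_vsra : Prop := ∀ (WW : String) (a_chunks : List Int) (b_chunks : List Int), Dom_build_64bit_result_vsra WW a_chunks b_chunks → Pre_build_64bit_result_vsra WW a_chunks b_chunks → Spec_build_64bit_result_vsra WW a_chunks b_chunks (build_64bit_result_vsra WW a_chunks b_chunks)

-- ===== LEMMAS AND PROOFS =====
theorem band_mask (a : Int) (n : Nat) : PySem.Int.band a (2^n - 1) = a % (2^n) := by
  have hcast : ((2:Int)^n) = ((2^n : Nat) : Int) := by push_cast; ring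
  have hN1 : 1 ≤ 2^n := Nat.one_le_two_pow
  by_cases ha : 0 ≤ a
  · rw [PySem.Int.band_of_nonneg ha (by rw [hcast]; omega)]
    have h1 : ((2:Int)^n - 1).toNat = 2^n - 1 := by rw [hcast]; omega
    rw [h1, Nat.and_two_pow_sub_one_eq_mod]
    have h2 : a = (a.toNat : Int) := by omega
    rw [h2]; push_cast; simp
  · have hb : (0:Int) ≤ 2^n - 1 := by rw [hcast]; omega
    rw [PySem.Int.band]
    simp only [if_neg ha, if_pos hb]
    have h1 : ((2:Int)^n - 1).toNat = 2^n - 1 := by rw [hcast]; omega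
    rw [h1, Nat.and_comm, Nat.and_two_pow_sub_one_eq_mod]
    set t : Nat := (-a - 1).toNat with ht
    have hat : a = -((t:Int) + 1) := by omega
    have hmlt : t % 2^n < 2^n := Nat.mod_lt _ (by omega)
    have expand : a = (((2^n:Nat):Int) - 1 - ((t % 2^n : Nat):Int)) + ((2^n:Nat):Int) * (-((t / 2^n : Nat):Int) - 1) := by
      conv_lhs => rw [hat, ← Nat.div_add_mod t (2^n)]
      push_cast; ring
    have key : a % (2^n : Int) = ((2^n:Nat):Int) - 1 - ((t % 2^n : Nat):Int) := by
      rw [hcast, expand, Int.add_mul_emod_self_left, Int.emod_eq_of_lt (by omega) (by omega)]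
    rw [key]; omega

theorem sign_test (u : Int) (w : Nat) (hw : 0 < w) (hu0 : 0 ≤ u) (hu : u < 2^w) :
    (PySem.Int.band u (2^(w-1)) ≠ 0) ↔ 2^(w-1) ≤ u := by
  have hpos : (0:Int) ≤ 2^(w-1) := by positivity
  rw [PySem.Int.band_of_nonneg hu0 hpos]
  have hc1 : ((2:Int)^(w-1)) = ((2^(w-1) : Nat) : Int) := by push_cast; ring
  have hcast : ((2:Int)^(w-1)).toNat = 2^(w-1) := by rw [hc1]; omega
  rw [hcast, Nat.and_two_pow, Nat.testBit_eq_decide_div_mod_eq]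
  have hcw : ((2:Int)^w) = ((2^w : Nat) : Int) := by push_cast; ring
  have hut : u.toNat < 2^w := by rw [hcw] at hu; omega
  have hww : 2^w = 2^(w-1) * 2 := by rw [← pow_succ]; congr 1; omega
  have hp : 0 < 2^(w-1) := by positivity
  constructor
  · intro h
    by_contra hlt
    have hlt' : u.toNat < 2^(w-1) := by rw [hc1] at hlt; omega
    have hz : u.toNat / 2^(w-1) = 0 := Nat.div_eq_of_lt hlt'
    simp only [hz] at h
    norm_num at h
  · intro h
    have h' : 2^(w-1) ≤ u.toNat := by rw [hc1] at h; omega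
    have h1 : 1 ≤ u.toNat / 2^(w-1) := (Nat.le_div_iff_mul_le hp).2 (by omega)
    have h2' : u.toNat / 2^(w-1) < 2 := Nat.div_lt_of_lt_mul (by omega)
    have h3 : u.toNat / 2^(w-1) = 1 := by omega
    simp only [h3]
    norm_num

theorem bor_dvd_add (x y : Int) (k : Nat) (hx : 0 ≤ x) (hd : (2^k:Int) ∣ x) (hy0 : 0 ≤ y) (hy : y < 2^k) :
    PySem.Int.bor x y = x + y := by
  rw [PySem.Int.bor_of_nonneg hx hy0]
  have hck : ((2:Int)^k) = ((2^k : Nat) : Int) := by push_cast; ring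
  obtain ⟨c, hc⟩ := hd
  have hc0 : 0 ≤ c := by
    by_contra h
    push Not at h
    nlinarith [pow_pos (by norm_num : (0:Int) < 2) k]
  have hxc : x = ((c.toNat <<< k : Nat) : Int) := by
    rw [hc]
    push_cast [Nat.shiftLeft_eq]
    rw [Int.toNat_of_nonneg hc0]
    ring
  have hxt : x.toNat = c.toNat <<< k := by omega
  have hyt : y.toNat < 2^k := by rw [hck] at hy; omega
  rw [hxt, ← Nat.shiftLeft_add_eq_or_of_lt hyt, Nat.cast_add, ← hxc, Int.toNat_of_nonneg hy0]

theorem stepA (S r : Int) (k w : Nat) (hS0 : 0 ≤ S) (hSd : (2^(k+w):Int) ∣ S)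
    (h0 : 0 ≤ r) (h1 : r < 2^w) : PySem.Int.bor S (r <<< k) = S + r * 2^k := by
  rw [Int.shiftLeft_eq]
  refine bor_dvd_add S _ (k+w) hS0 hSd (mul_nonneg h0 (by positivity)) ?_
  have hp : (2:Int)^(k+w) = 2^k * 2^w := by rw [pow_add]
  nlinarith [pow_pos (by norm_num : (0:Int) < 2) k]

-- bitsToInt: fold from an arbitrary accumulator
theorem bitsFold (l : List Char) : ∀ a : Int,
    l.foldl (fun acc c => 2 * acc + (if c = '1' then 1 else 0)) a
      = a * 2^l.length + l.foldl (fun acc c => 2 * acc + (if c = '1' then 1 else 0)) 0 := by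
  induction l with
  | nil => intro a; simp
  | cons c t ih =>
    intro a
    simp only [List.foldl_cons, List.length_cons]
    rw [ih (2*a + (if c = '1' then 1 else 0)), ih (2*0 + (if c = '1' then 1 else 0))]
    ring

theorem bitsToInt_append (l1 l2 : List Char) :
    bitsToInt (l1 ++ l2) = bitsToInt l1 * 2^l2.length + bitsToInt l2 := by
  unfold bitsToInt
  rw [List.foldl_append, bitsFold]

theorem bitsToInt_cons (c : Char) (t : List Char) :
    bitsToInt (c :: t) = (if c = '1' then 1 else 0) * 2^t.length + bitsToInt t := by
  have h := bitsToInt_append [c] t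
  simpa [bitsToInt] using h

theorem bitsToInt_bounds (l : List Char) : 0 ≤ bitsToInt l ∧ bitsToInt l < 2^l.length := by
  induction l with
  | nil => simp [bitsToInt]
  | cons c t ih =>
    rw [bitsToInt_cons]
    have hp : (0:Int) < 2^t.length := by positivity
    simp only [List.length_cons, pow_succ]
    split_ifs <;> constructor <;> nlinarith [ih.1, ih.2]

theorem bitsToInt_replicate (k : Nat) (c : Char) :
    bitsToInt (List.replicate k c) = if c = '1' then 2^k - 1 else 0 := by
  induction k with
  | zero => simp [bitsToInt]
  | succ k ih =>
    rw [List.replicate_succ, bitsToInt_cons, List.length_replicate, ih]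
    split_ifs
    · ring
    · ring

-- padBin facts
theorem padBin_length (n w : Nat) : (padBin n w).length = w := by simp [padBin]

theorem padBin_succ (n w : Nat) :
    padBin n (w+1) = (if n.testBit w then '1' else '0') :: padBin n w := by
  simp only [padBin, List.range_succ_eq_map, List.map_cons, List.map_map]
  rw [List.cons_eq_cons]
  refine ⟨by norm_num, List.map_congr_left fun i hi => ?_⟩
  have h1 : w + 1 - 1 - (i + 1) = w - 1 - i := by omega
  have h2 : w - (i + 1) = w - 1 - i := by omega
  simp [Function.comp, h2]

theorem bitsToInt_padBin (n w : Nat) : bitsToInt (padBin n w) = ((n % 2^w : Nat) : Int) := by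
  induction w with
  | zero => simp [padBin, bitsToInt]
  | succ w ih =>
    rw [padBin_succ, bitsToInt_cons, padBin_length, ih, Nat.mod_pow_succ,
      Nat.testBit_eq_decide_div_mod_eq]
    by_cases h : n / 2^w % 2 = 1
    · simp only [h, decide_true, if_true]
      push_cast
      ring
    · have h0 : n / 2^w % 2 = 0 := by omega
      simp [h0]

theorem padBin_take (n w t : Nat) (h : t ≤ w) :
    (padBin n w).take t = padBin (n / 2^(w-t)) t := by
  simp only [padBin]
  rw [← List.map_take, List.take_range, Nat.min_eq_left h]
  refine List.map_congr_left fun i hi => ?_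
  rw [List.mem_range] at hi
  have hidx : w - 1 - i = (w - t) + (t - 1 - i) := by omega
  rw [hidx, ← Nat.testBit_shiftRight, Nat.shiftRight_eq_div_pow]

theorem padBin_headD (n w : Nat) (hw : 0 < w) :
    (padBin n w).headD '0' = if n.testBit (w-1) then '1' else '0' := by
  obtain ⟨w', rfl⟩ : ∃ w', w = w'+1 := ⟨w-1, by omega⟩
  rw [padBin_succ]
  simp

theorem testBit_top (n w : Nat) (h : n < 2^w) (hw : 0 < w) :
    n.testBit (w-1) = decide (2^(w-1) ≤ n) := by
  rw [Nat.testBit_eq_decide_div_mod_eq]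
  have h2 : 2^w = 2^(w-1) * 2 := by rw [← pow_succ]; congr 1; omega
  have hp : 0 < 2^(w-1) := by positivity
  rcases le_or_gt (2^(w-1)) n with hle | hlt
  · have h1 : 1 ≤ n / 2^(w-1) := (Nat.le_div_iff_mul_le hp).2 (by omega)
    have h2' : n / 2^(w-1) < 2 := Nat.div_lt_of_lt_mul (by omega)
    have h3 : n / 2^(w-1) = 1 := by omega
    simp [h3, hle]
  · have hz : n / 2^(w-1) = 0 := Nat.div_eq_of_lt hlt
    simp [hz]
    omega

-- the arithmetic value of a sign-extended shifted field
theorem sraVal (n k w : Nat) (hn : n < 2^w) :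
    ((if 2^(w-1) ≤ n then ((n:Int) - 2^w) else (n:Int)) / ((2^k : Nat) : Int)) % 2^w
      = (if 2^(w-1) ≤ n then ((2:Int)^(min k w) - 1) * 2^(w - min k w) else 0)
        + ((n / 2^(min k w) : Nat) : Int) := by
  have hkc : ((2^k : Nat) : Int) = (2:Int)^k := by push_cast; ring
  have hkp : (0:Int) < 2^k := by positivity
  have hwp : (0:Int) < 2^w := by positivity
  rcases le_or_gt k w with hkw | hkw
  · -- min k w = k
    rw [Nat.min_eq_left hkw]
    have hsplit : (2:Int)^w = 2^k * 2^(w-k) := by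
      rw [← pow_add]; congr 1; omega
    have hq : n / 2^k < 2^(w-k) := by
      rw [Nat.div_lt_iff_lt_mul (by positivity)]
      calc n < 2^w := hn
        _ = 2^(w-k) * 2^k := by rw [← pow_add]; congr 1; omega
    have hqc : ((n:Int)) / ((2^k : Nat) : Int) = ((n / 2^k : Nat) : Int) := (Int.natCast_ediv n (2^k)).symm
    by_cases htop : 2^(w-1) ≤ n
    · simp only [htop, if_true]
      have hr : n = 2^k * (n / 2^k) + n % 2^k := (Nat.div_add_mod n (2^k)).symm
      have hrlt : n % 2^k < 2^k := Nat.mod_lt _ (by positivity)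
      have hdiv : ((n:Int) - 2^w) / ((2^k : Nat) : Int)
          = ((n / 2^k : Nat) : Int) - 2^(w-k) := by
        rw [hkc]
        have : (n:Int) - 2^w = ((n % 2^k : Nat) : Int) + (((n / 2^k : Nat) : Int) - 2^(w-k)) * 2^k := by
          rw [hsplit]
          conv_lhs => rw [show (n:Int) = ((2^k * (n / 2^k) + n % 2^k : Nat) : Int) by rw [← hr]]
          push_cast
          ring
        rw [this, Int.add_mul_ediv_right _ _ (by positivity : (2:Int)^k ≠ 0) ,
          Int.ediv_eq_zero_of_lt (by positivity) (by exact_mod_cast hrlt)]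
        ring
      rw [hdiv]
      have hx0 : ((n / 2^k : Nat) : Int) - 2^(w-k) < 0 := by
        have : ((n / 2^k : Nat) : Int) < 2^(w-k) := by exact_mod_cast hq
        omega
      have hx1 : (0:Int) ≤ ((n / 2^k : Nat) : Int) - 2^(w-k) + 2^w := by
        have h1 : (2:Int)^(w-k) ≤ 2^w := by
          apply pow_le_pow_right₀ (by norm_num) (by omega)
        have h2 : (0:Int) ≤ ((n / 2^k : Nat) : Int) := by positivity
        omega
      have : (((n / 2^k : Nat) : Int) - 2^(w-k)) % 2^w
          = ((n / 2^k : Nat) : Int) - 2^(w-k) + 2^w := by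
        conv_lhs => rw [show ((n / 2^k : Nat) : Int) - 2^(w-k) = (((n / 2^k : Nat) : Int) - 2^(w-k) + 2^w) + 2^w * (-1) by ring]
        rw [Int.add_mul_emod_self_left, Int.emod_eq_of_lt hx1 (by omega)]
      rw [this, hsplit]
      ring
    · simp only [htop, if_false]
      rw [hqc, Int.emod_eq_of_lt (by positivity) ?hlt]
      · ring
      case hlt =>
        have : ((n / 2^k : Nat) : Int) < 2^(w-k) := by exact_mod_cast hq
        have h1 : (2:Int)^(w-k) ≤ 2^w := by
          apply pow_le_pow_right₀ (by norm_num) (by omega)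
        omega
  · -- k > w: min = w, the shift saturates
    rw [Nat.min_eq_right (by omega : w ≤ k)]
    have hz : n / 2^w = 0 := Nat.div_eq_of_lt hn
    have hwk : (2:Int)^w ≤ 2^k := by
      apply pow_le_pow_right₀ (by norm_num) (by omega)
    by_cases htop : 2^(w-1) ≤ n
    · simp only [htop, if_true]
      have hdiv : ((n:Int) - 2^w) / ((2^k : Nat) : Int) = -1 := by
        rw [hkc]
        have hlt0 : (n:Int) - 2^w < 0 := by
          have : (n:Int) < 2^w := by exact_mod_cast hn
          omega
        have hge : (0:Int) ≤ (n:Int) - 2^w + 2^k := by omega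
        have e : (n:Int) - 2^w = ((n:Int) - 2^w + 2^k) + (-1) * 2^k := by ring
        rw [e, Int.add_mul_ediv_right _ _ (by positivity : (2:Int)^k ≠ 0),
          Int.ediv_eq_zero_of_lt hge (by omega)]
        ring
      rw [hdiv]
      have : (-1 : Int) % 2^w = 2^w - 1 := by
        conv_lhs => rw [show (-1 : Int) = (2^w - 1) + 2^w * (-1) by ring]
        rw [Int.add_mul_emod_self_left, Int.emod_eq_of_lt (by omega) (by omega)]
      rw [this, hz]
      simp only [Nat.sub_self, pow_zero, Nat.cast_zero]
      ring
    · simp only [htop, if_false]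
      have hdiv : ((n:Int)) / ((2^k : Nat) : Int) = 0 := by
        rw [hkc]
        exact Int.ediv_eq_zero_of_lt (by positivity) (by exact_mod_cast lt_of_lt_of_le hn (by exact_mod_cast hwk))
      rw [hdiv, hz]
      simp

theorem laneB_length (a b : Int) (w : Nat) : (laneB a b w).length = w := by
  simp only [laneB, List.length_take, List.length_append, List.length_replicate, padBin_length]
  omega

-- the lane lemma: B's textual shift computes exactly A's sra
theorem laneB_eq (v s : Int) (w : Nat) (hw : 0 < w) :
    bitsToInt (laneB v s w) = pySra v s w := by
  have h2w : ((1:Int) <<< w) = 2^w := by rw [Int.shiftLeft_eq]; ring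
  have h2h : ((1:Int) <<< (w-1)) = 2^(w-1) := by rw [Int.shiftLeft_eq]; ring
  have hwp : (0:Int) < 2^w := by positivity
  simp only [pySra, laneB, h2w, h2h, band_mask]
  set u := v % 2^w with hu
  have hu0 : 0 ≤ u := Int.emod_nonneg v (by positivity)
  have hult : u < 2^w := Int.emod_lt_of_pos v hwp
  have hcw : ((2:Int)^w) = ((2^w : Nat) : Int) := by push_cast; ring
  set n := u.toNat with hn
  have hun : u = (n:Int) := by omega
  have hnlt : n < 2^w := by rw [hcw] at hult; omega
  set k := s.toNat with hk
  set m := min k w with hm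
  have hmw : m ≤ w := Nat.min_le_right _ _
  -- the taken list
  have hheadD : (padBin n w).headD '0' = if 2^(w-1) ≤ n then '1' else '0' := by
    rw [padBin_headD n w hw, testBit_top n w hnlt hw]
    by_cases h : 2^(w-1) ≤ n
    · simp [h]
    · simp [h]
  have htake : (List.replicate m ((padBin n w).headD '0') ++ padBin n w).take w
      = List.replicate m ((padBin n w).headD '0') ++ padBin (n / 2^m) (w - m) := by
    have hww : w - (w - m) = m := by omega
    rw [List.take_append, List.take_replicate, Nat.min_eq_right hmw, List.length_replicate,
      padBin_take n w (w - m) (by omega), hww]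
  rw [htake, bitsToInt_append, bitsToInt_replicate, padBin_length, bitsToInt_padBin]
  have hdm : n / 2^m < 2^(w-m) := by
    rw [Nat.div_lt_iff_lt_mul (by positivity)]
    calc n < 2^w := hnlt
      _ = 2^(w-m) * 2^m := by rw [← pow_add]; congr 1; omega
  have hmod : (n / 2^m) % 2^(w-m) = n / 2^m := Nat.mod_eq_of_lt hdm
  rw [hmod]
  -- the A side
  have hsign : (PySem.Int.band u (2^(w-1)) ≠ 0) ↔ 2^(w-1) ≤ n := by
    rw [sign_test u w hw hu0 hult]
    constructor
    · intro h; rw [hun] at h; exact_mod_cast h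
    · intro h; rw [hun]; exact_mod_cast h
  have hshift : ∀ x : Int, x >>> k = x / ((2^k : Nat) : Int) := by
    intro x
    rw [Int.shiftRight_eq_div_pow]
  rw [hheadD]
  have hA := sraVal n k w hnlt
  rw [← hm] at hA
  by_cases htop : 2^(w-1) ≤ n
  · rw [if_pos (hsign.mpr htop)]
    rw [if_pos htop] at hA
    rw [hun, hshift, hA]
    simp [htop]
  · rw [if_neg (fun h => htop (hsign.mp h))]
    rw [if_neg htop] at hA
    rw [hun, hshift, hA]
    simp [htop]

-- branch proofs
theorem branch00 (a_chunks b_chunks : List Int) :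
    build_64bit_result_vsra "00" a_chunks b_chunks = build_64bit_result_vsra_alt "00" a_chunks b_chunks := by
  simp only [build_64bit_result_vsra, build_64bit_result_vsra_alt, packB, String.reduceEq, reduceIte, Nat.cast_ofNat]
  have hr : PySem.List.pyRange 0 8 1 = [0, 1, 2, 3, 4, 5, 6, 7] := by decide
  rw [hr]
  simp only [List.map, List.foldl, List.flatten_cons, List.flatten_nil, List.append_nil]
  norm_num
  have srw : ∀ v s : Int, pySra v s 8 = bitsToInt (laneB v s 8) :=
    fun v s => (laneB_eq v s 8 (by norm_num)).symm
  simp only [srw, show (8:Int).toNat = 8 from rfl, show (16:Int).toNat = 16 from rfl, show (24:Int).toNat = 24 from rfl, show (32:Int).toNat = 32 from rfl, show (40:Int).toNat = 40 from rfl, show (48:Int).toNat = 48 from rfl, show (56:Int).toNat = 56 from rfl]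
  refine ⟨?_, by simp⟩
  have hb : ∀ v s : Int, 0 ≤ bitsToInt (laneB v s 8) ∧ bitsToInt (laneB v s 8) < 2^8 := by
    intro v s
    have h := bitsToInt_bounds (laneB v s 8)
    rwa [laneB_length] at h
  obtain ⟨h0, h0'⟩ := hb (PySem.List.pyGetD a_chunks 0 0) (PySem.List.pyGetD b_chunks 0 0)
  set r0 := bitsToInt (laneB (PySem.List.pyGetD a_chunks 0 0) (PySem.List.pyGetD b_chunks 0 0) 8) with hrdef0
  obtain ⟨h1, h1'⟩ := hb (PySem.List.pyGetD a_chunks 1 0) (PySem.List.pyGetD b_chunks 1 0)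
  set r1 := bitsToInt (laneB (PySem.List.pyGetD a_chunks 1 0) (PySem.List.pyGetD b_chunks 1 0) 8) with hrdef1
  obtain ⟨h2, h2'⟩ := hb (PySem.List.pyGetD a_chunks 2 0) (PySem.List.pyGetD b_chunks 2 0)
  set r2 := bitsToInt (laneB (PySem.List.pyGetD a_chunks 2 0) (PySem.List.pyGetD b_chunks 2 0) 8) with hrdef2
  obtain ⟨h3, h3'⟩ := hb (PySem.List.pyGetD a_chunks 3 0) (PySem.List.pyGetD b_chunks 3 0)
  set r3 := bitsToInt (laneB (PySem.List.pyGetD a_chunks 3 0) (PySem.List.pyGetD b_chunks 3 0) 8) with hrdef3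
  obtain ⟨h4, h4'⟩ := hb (PySem.List.pyGetD a_chunks 4 0) (PySem.List.pyGetD b_chunks 4 0)
  set r4 := bitsToInt (laneB (PySem.List.pyGetD a_chunks 4 0) (PySem.List.pyGetD b_chunks 4 0) 8) with hrdef4
  obtain ⟨h5, h5'⟩ := hb (PySem.List.pyGetD a_chunks 5 0) (PySem.List.pyGetD b_chunks 5 0)
  set r5 := bitsToInt (laneB (PySem.List.pyGetD a_chunks 5 0) (PySem.List.pyGetD b_chunks 5 0) 8) with hrdef5
  obtain ⟨h6, h6'⟩ := hb (PySem.List.pyGetD a_chunks 6 0) (PySem.List.pyGetD b_chunks 6 0)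
  set r6 := bitsToInt (laneB (PySem.List.pyGetD a_chunks 6 0) (PySem.List.pyGetD b_chunks 6 0) 8) with hrdef6
  obtain ⟨h7, h7'⟩ := hb (PySem.List.pyGetD a_chunks 7 0) (PySem.List.pyGetD b_chunks 7 0)
  set r7 := bitsToInt (laneB (PySem.List.pyGetD a_chunks 7 0) (PySem.List.pyGetD b_chunks 7 0) 8) with hrdef7
  rw [stepA (0) r0 56 8 (by positivity) (dvd_zero _) h0 h0']
  rw [stepA (0 + r0 * 2^56) r1 48 8 (by linarith [mul_nonneg h0 (show (0:Int) ≤ 2^56 by positivity)]) (⟨r0 * 2^0, by ring⟩) h1 h1']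
  rw [stepA (0 + r0 * 2^56 + r1 * 2^48) r2 40 8 (by linarith [mul_nonneg h0 (show (0:Int) ≤ 2^56 by positivity), mul_nonneg h1 (show (0:Int) ≤ 2^48 by positivity)]) (⟨r0 * 2^8 + r1 * 2^0, by ring⟩) h2 h2']
  rw [stepA (0 + r0 * 2^56 + r1 * 2^48 + r2 * 2^40) r3 32 8 (by linarith [mul_nonneg h0 (show (0:Int) ≤ 2^56 by positivity), mul_nonneg h1 (show (0:Int) ≤ 2^48 by positivity), mul_nonneg h2 (show (0:Int) ≤ 2^40 by positivity)]) (⟨r0 * 2^16 + r1 * 2^8 + r2 * 2^0, by ring⟩) h3 h3']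
  rw [stepA (0 + r0 * 2^56 + r1 * 2^48 + r2 * 2^40 + r3 * 2^32) r4 24 8 (by linarith [mul_nonneg h0 (show (0:Int) ≤ 2^56 by positivity), mul_nonneg h1 (show (0:Int) ≤ 2^48 by positivity), mul_nonneg h2 (show (0:Int) ≤ 2^40 by positivity), mul_nonneg h3 (show (0:Int) ≤ 2^32 by positivity)]) (⟨r0 * 2^24 + r1 * 2^16 + r2 * 2^8 + r3 * 2^0, by ring⟩) h4 h4']
  rw [stepA (0 + r0 * 2^56 + r1 * 2^48 + r2 * 2^40 + r3 * 2^32 + r4 * 2^24) r5 16 8 (by linarith [mul_nonneg h0 (show (0:Int) ≤ 2^56 by positivity), mul_nonneg h1 (show (0:Int) ≤ 2^48 by positivity), mul_nonneg h2 (show (0:Int) ≤ 2^40 by positivity), mul_nonneg h3 (show (0:Int) ≤ 2^32 by positivity), mul_nonneg h4 (show (0:Int) ≤ 2^24 by positivity)]) (⟨r0 * 2^32 + r1 * 2^24 + r2 * 2^16 + r3 * 2^8 + r4 * 2^0, by ring⟩) h5 h5']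
  rw [stepA (0 + r0 * 2^56 + r1 * 2^48 + r2 * 2^40 + r3 * 2^32 + r4 * 2^24 + r5 * 2^16) r6 8 8 (by linarith [mul_nonneg h0 (show (0:Int) ≤ 2^56 by positivity), mul_nonneg h1 (show (0:Int) ≤ 2^48 by positivity), mul_nonneg h2 (show (0:Int) ≤ 2^40 by positivity), mul_nonneg h3 (show (0:Int) ≤ 2^32 by positivity), mul_nonneg h4 (show (0:Int) ≤ 2^24 by positivity), mul_nonneg h5 (show (0:Int) ≤ 2^16 by positivity)]) (⟨r0 * 2^40 + r1 * 2^32 + r2 * 2^24 + r3 * 2^16 + r4 * 2^8 + r5 * 2^0, by ring⟩) h6 h6']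
  rw [bor_dvd_add (0 + r0 * 2^56 + r1 * 2^48 + r2 * 2^40 + r3 * 2^32 + r4 * 2^24 + r5 * 2^16 + r6 * 2^8) r7 8 (by linarith [mul_nonneg h0 (show (0:Int) ≤ 2^56 by positivity), mul_nonneg h1 (show (0:Int) ≤ 2^48 by positivity), mul_nonneg h2 (show (0:Int) ≤ 2^40 by positivity), mul_nonneg h3 (show (0:Int) ≤ 2^32 by positivity), mul_nonneg h4 (show (0:Int) ≤ 2^24 by positivity), mul_nonneg h5 (show (0:Int) ≤ 2^16 by positivity), mul_nonneg h6 (show (0:Int) ≤ 2^8 by positivity)]) (⟨r0 * 2^48 + r1 * 2^40 + r2 * 2^32 + r3 * 2^24 + r4 * 2^16 + r5 * 2^8 + r6 * 2^0, by ring⟩) h7 h7']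
  simp only [bitsToInt_append, List.length_append, laneB_length, ← hrdef0, ← hrdef1, ← hrdef2, ← hrdef3, ← hrdef4, ← hrdef5, ← hrdef6, ← hrdef7]
  norm_num
  ring

theorem branch01 (a_chunks b_chunks : List Int) :
    build_64bit_result_vsra "01" a_chunks b_chunks = build_64bit_result_vsra_alt "01" a_chunks b_chunks := by
  simp only [build_64bit_result_vsra, build_64bit_result_vsra_alt, packB, String.reduceEq, reduceIte, Nat.cast_ofNat]
  have hr : PySem.List.pyRange 0 4 1 = [0, 1, 2, 3] := by decide
  rw [hr]
  simp only [List.map, List.foldl, List.flatten_cons, List.flatten_nil, List.append_nil]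
  norm_num
  have srw : ∀ v s : Int, pySra v s 16 = bitsToInt (laneB v s 16) :=
    fun v s => (laneB_eq v s 16 (by norm_num)).symm
  simp only [srw, show (16:Int).toNat = 16 from rfl, show (32:Int).toNat = 32 from rfl, show (48:Int).toNat = 48 from rfl]
  refine ⟨?_, by simp⟩
  have hb : ∀ v s : Int, 0 ≤ bitsToInt (laneB v s 16) ∧ bitsToInt (laneB v s 16) < 2^16 := by
    intro v s
    have h := bitsToInt_bounds (laneB v s 16)
    rwa [laneB_length] at h
  obtain ⟨h0, h0'⟩ := hb (PySem.List.pyGetD a_chunks 0 0) (PySem.List.pyGetD b_chunks 0 0)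
  set r0 := bitsToInt (laneB (PySem.List.pyGetD a_chunks 0 0) (PySem.List.pyGetD b_chunks 0 0) 16) with hrdef0
  obtain ⟨h1, h1'⟩ := hb (PySem.List.pyGetD a_chunks 1 0) (PySem.List.pyGetD b_chunks 1 0)
  set r1 := bitsToInt (laneB (PySem.List.pyGetD a_chunks 1 0) (PySem.List.pyGetD b_chunks 1 0) 16) with hrdef1
  obtain ⟨h2, h2'⟩ := hb (PySem.List.pyGetD a_chunks 2 0) (PySem.List.pyGetD b_chunks 2 0)
  set r2 := bitsToInt (laneB (PySem.List.pyGetD a_chunks 2 0) (PySem.List.pyGetD b_chunks 2 0) 16) with hrdef2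
  obtain ⟨h3, h3'⟩ := hb (PySem.List.pyGetD a_chunks 3 0) (PySem.List.pyGetD b_chunks 3 0)
  set r3 := bitsToInt (laneB (PySem.List.pyGetD a_chunks 3 0) (PySem.List.pyGetD b_chunks 3 0) 16) with hrdef3
  rw [stepA (0) r0 48 16 (by positivity) (dvd_zero _) h0 h0']
  rw [stepA (0 + r0 * 2^48) r1 32 16 (by linarith [mul_nonneg h0 (show (0:Int) ≤ 2^48 by positivity)]) (⟨r0 * 2^0, by ring⟩) h1 h1']
  rw [stepA (0 + r0 * 2^48 + r1 * 2^32) r2 16 16 (by linarith [mul_nonneg h0 (show (0:Int) ≤ 2^48 by positivity), mul_nonneg h1 (show (0:Int) ≤ 2^32 by positivity)]) (⟨r0 * 2^16 + r1 * 2^0, by ring⟩) h2 h2']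
  rw [bor_dvd_add (0 + r0 * 2^48 + r1 * 2^32 + r2 * 2^16) r3 16 (by linarith [mul_nonneg h0 (show (0:Int) ≤ 2^48 by positivity), mul_nonneg h1 (show (0:Int) ≤ 2^32 by positivity), mul_nonneg h2 (show (0:Int) ≤ 2^16 by positivity)]) (⟨r0 * 2^32 + r1 * 2^16 + r2 * 2^0, by ring⟩) h3 h3']
  simp only [bitsToInt_append, List.length_append, laneB_length, ← hrdef0, ← hrdef1, ← hrdef2, ← hrdef3]
  norm_num
  ring

theorem branch10 (a_chunks b_chunks : List Int) :
    build_64bit_result_vsra "10" a_chunks b_chunks = build_64bit_result_vsra_alt "10" a_chunks b_chunks := by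
  simp only [build_64bit_result_vsra, build_64bit_result_vsra_alt, packB, String.reduceEq, reduceIte, Nat.cast_ofNat]
  have hr : PySem.List.pyRange 0 2 1 = [0, 1] := by decide
  rw [hr]
  simp only [List.map, List.flatten_cons, List.flatten_nil, List.append_nil]
  norm_num
  have srw : ∀ v s : Int, pySra v s 32 = bitsToInt (laneB v s 32) :=
    fun v s => (laneB_eq v s 32 (by norm_num)).symm
  simp only [srw]
  refine ⟨?_, by simp⟩
  have hb : ∀ v s : Int, 0 ≤ bitsToInt (laneB v s 32) ∧ bitsToInt (laneB v s 32) < 2^32 := by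
    intro v s
    have h := bitsToInt_bounds (laneB v s 32)
    rwa [laneB_length] at h
  obtain ⟨h0, h0'⟩ := hb (PySem.List.pyGetD a_chunks 0 0) (PySem.List.pyGetD b_chunks 0 0)
  obtain ⟨h1, h1'⟩ := hb (PySem.List.pyGetD a_chunks 1 0) (PySem.List.pyGetD b_chunks 1 0)
  set r0 := bitsToInt (laneB (PySem.List.pyGetD a_chunks 0 0) (PySem.List.pyGetD b_chunks 0 0) 32)
  set r1 := bitsToInt (laneB (PySem.List.pyGetD a_chunks 1 0) (PySem.List.pyGetD b_chunks 1 0) 32)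
  rw [bitsToInt_append, laneB_length, Int.shiftLeft_eq]
  exact bor_dvd_add _ _ 32 (mul_nonneg h0 (by positivity)) ⟨r0, by ring⟩ h1 h1'

theorem branch11 (a_chunks b_chunks : List Int) :
    build_64bit_result_vsra "11" a_chunks b_chunks = build_64bit_result_vsra_alt "11" a_chunks b_chunks := by
  simp only [build_64bit_result_vsra, build_64bit_result_vsra_alt, String.reduceEq, reduceIte]
  rw [laneB_eq _ _ 64 (by norm_num)]

theorem branch_other (WW : String) (a_chunks b_chunks : List Int)
    (h00 : WW ≠ "00") (h01 : WW ≠ "01") (h10 : WW ≠ "10") (h11 : WW ≠ "11") :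
    build_64bit_result_vsra WW a_chunks b_chunks = build_64bit_result_vsra_alt WW a_chunks b_chunks := by
  simp only [build_64bit_result_vsra, build_64bit_result_vsra_alt,
    if_neg h00, if_neg h01, if_neg h10, if_neg h11]

-- ===== VERDICT (by name: the statement is the Claim_ definition above) =====
theorem build_64bit_result_vsra_spec : Claim_equal_build_64bit_result_vsra := by
  intro WW a_chunks b_chunks _hdom _hpre
  unfold Spec_build_64bit_result_vsra
  by_cases h00 : WW = "00"
  · subst h00; exact branch00 a_chunks b_chunks
  by_cases h01 : WW = "01"
  · subst h01; exact branch01 a_chunks b_chunks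
  by_cases h10 : WW = "10"
  · subst h10; exact branch10 a_chunks b_chunks
  by_cases h11 : WW = "11"
  · subst h11; exact branch11 a_chunks b_chunks
  exact branch_other WW a_chunks b_chunks h00 h01 h10 h11
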